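-- pv_equiv track=rewrite | github.com/pypi-data/pypi-mirror-279 | packages/finesse-virgo/finesse_virgo-1.0.6-py3-none-any.whl/finesse_virgo/virgo.py | filter_readout_sequence
-- ===== SOURCE A (Python) =====
-- def filter_readout_sequence(sequence):
--     """Filter a given sequence of dof readout pairs.
--
--     Given a sequence of dof readout pairs, prioritize I over Q if
--     duplicate readouts are found.
--
--     Parameters
--     ==========
--     sequence: list
--         Sequence of dof, readout_signal pairs. E.g.,
--         ['PRCL', 'B2_8_I', 'MICH', 'B2_56_Q', 'SRCL', 'B2_56_I'].
--         If duplicate readouts are found (B2_56 in the previous example),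
--         the Q signal and associated dof will be removed.
--     """
--
--     # Extracting control signals without the "_I" or "_Q" suffixes
--     signals = [signal.rsplit("_", 1)[0] for signal in sequence[1::2]]
--
--     # Identifying duplicates
--     duplicates = set([signal for signal in signals if signals.count(signal) > 1])
--
--     # Filtering out the Q to prioritize I
--     filtered_sequence = []
--     for i in range(0, len(sequence), 2):
--         readout = sequence[i + 1].rsplit("_", 1)[0]
--
--         # If it's a duplicate and ends with "_Q", skip
--         if readout in duplicates and sequence[i + 1].endswith("_Q"):
--             continue
--
--         # Otherwise, add the pair to the filtered list
--         filtered_sequence.extend([sequence[i], sequence[i + 1]])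
--
--     return filtered_sequence
-- ===== SOURCE B (Python) =====
-- def filter_readout_sequence(sequence):
--     """Filter a sequence of dof/readout pairs, dropping the Q pair of a
--     duplicated readout base to prioritize I.
--
--     Pairs come from slicing (dofs, readouts) instead of index arithmetic;
--     duplicate bases are found by sorting a copy of the base list and
--     scanning adjacent elements instead of a quadratic count scan; the
--     output is a single flattening comprehension, in original order.
--     """
--     dofs = sequence[0::2]
--     readouts = sequence[1::2]
--     bases = [r.rsplit("_", 1)[0] for r in readouts]
--     srt = sorted(bases)
--     duplicates = {srt[k] for k in range(1, len(srt)) if srt[k] == srt[k - 1]}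
--     return [x for d, r, b in zip(dofs, readouts, bases)
--             if not (b in duplicates and r.endswith("_Q"))
--             for x in (d, r)]
-- ===== Notes on version B (the rewrite author's own statement) =====
-- stated objective: faster
-- what changed: Pairs are formed by slicing the even and odd positions and zipping them instead of an indexed range loop, duplicates are detected by sorting a copy of the base list and scanning adjacent elements instead of a quadratic signals.count scan, and the output is one flattening comprehension instead of an accumulator loop.
import Mathlib
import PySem

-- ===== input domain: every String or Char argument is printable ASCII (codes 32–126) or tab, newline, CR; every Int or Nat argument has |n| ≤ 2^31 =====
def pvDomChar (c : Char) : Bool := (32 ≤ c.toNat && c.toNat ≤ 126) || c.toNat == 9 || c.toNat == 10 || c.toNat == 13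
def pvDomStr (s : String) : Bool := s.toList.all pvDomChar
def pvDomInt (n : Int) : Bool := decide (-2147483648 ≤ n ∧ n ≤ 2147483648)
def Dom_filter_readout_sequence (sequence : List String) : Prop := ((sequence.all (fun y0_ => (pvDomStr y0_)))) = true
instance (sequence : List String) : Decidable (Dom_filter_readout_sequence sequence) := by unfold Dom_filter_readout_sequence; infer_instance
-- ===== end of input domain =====

-- B replaces the indexed pair loop with slice-and-zip, the quadratic signals.count scan with a
-- sorted-copy adjacent-element scan, and the accumulator loop with one flattening comprehension.

-- ===== PORT A =====
-- s.rsplit("_", 1)[0]: everything before the LAST '_', the whole string when there is none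
-- (exact for this call pattern: maxsplit 1, taking element 0).
def pvBaseChars (cs : List Char) : List Char :=
  match cs.reverse.dropWhile (fun c => c != '_') with
  | [] => cs
  | _ :: rest => rest.reverse

def pvBaseS (s : String) : String := String.ofList (pvBaseChars s.toList)

def filter_readout_sequence (sequence : List String) : List String :=
  let signals := ((PySem.List.slice? sequence (some 1) none 2).getD []).map pvBaseS
  let duplicates := PySem.Set.ofList (signals.filter (fun s => decide (signals.count s > 1)))
  (PySem.List.pyRange 0 sequence.length 2).foldl (fun filtered i =>
    let readout := pvBaseS (PySem.List.pyGetD sequence (i + 1) "")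
    if PySem.Set.contains duplicates readout
        && PySem.Str.endswith (PySem.List.pyGetD sequence (i + 1) "") "_Q" then
      filtered
    else
      filtered ++ [PySem.List.pyGetD sequence i "", PySem.List.pyGetD sequence (i + 1) ""]) []

-- ===== PORT B =====
def filter_readout_sequence_alt (sequence : List String) : List String :=
  let dofs := (PySem.List.slice? sequence none none 2).getD []
  let readouts := (PySem.List.slice? sequence (some 1) none 2).getD []
  let bases := readouts.map pvBaseS
  let srt := PySem.List.sorted bases (fun x => x) false
  let duplicates := PySem.Set.ofList
    ((PySem.List.pyRange 1 srt.length 1).filterMap (fun k =>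
        if PySem.List.pyGetD srt k "" = PySem.List.pyGetD srt (k - 1) ""
        then some (PySem.List.pyGetD srt k "") else none))
  ((dofs.zip readouts).zip bases).flatMap (fun p =>
    if !(PySem.Set.contains duplicates p.2 && PySem.Str.endswith p.1.2 "_Q")
    then [p.1.1, p.1.2] else [])

-- ===== PRECONDITION & SPEC =====
-- A indexes sequence[i + 1] for i = len - 1 on odd-length input (IndexError): Pre_ is even length.
def Pre_filter_readout_sequence (sequence : List String) : Prop := sequence.length % 2 = 0
instance (sequence : List String) : Decidable (Pre_filter_readout_sequence sequence) := by
  unfold Pre_filter_readout_sequence; infer_instance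

def pvWitness_filter_readout_sequence : List String :=
  ["PRCL", "B2_8_I", "MICH", "B2_56_Q", "SRCL", "B2_56_I"]

def Spec_filter_readout_sequence (sequence : List String) (out : List String) : Prop :=
  out = filter_readout_sequence_alt sequence
instance (sequence : List String) (out : List String) : Decidable (Spec_filter_readout_sequence sequence out) := by
  unfold Spec_filter_readout_sequence; infer_instance

-- ===== CLAIM (what is proved, stated in full; the proofs are below) =====
def Claim_equal_filter_readout_sequence : Prop := ∀ (sequence : List String), Dom_filter_readout_sequence sequence → Pre_filter_readout_sequence sequence → Spec_filter_readout_sequence sequence (filter_readout_sequence sequence)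

-- ===== LEMMAS AND PROOFS =====

-- consecutive non-overlapping pairs of a list (proof-side canonical form; dangling element dropped)
def pvPairs : List String → List (String × String)
  | x :: y :: rest => (x, y) :: pvPairs rest
  | _ => []

-- sequence[1::2] as a filterMap over indices 1, 3, 5, …
lemma slice?_odds (seq : List String) :
    (PySem.List.slice? seq (some 1) none 2).getD [] =
      List.filterMap (fun k => seq[1 + 2 * k]?) (List.range (seq.length / 2)) := by
  cases seq with
  | nil => rfl
  | cons a r =>
    simp only [PySem.List.slice?, PySem.List.sliceIndices]
    norm_num
    have hc : (if 0 < r.length then (((r.length : Int) + 2 - 1) / 2).toNat else 0) = (r.length + 1) / 2 := by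
      split <;> omega
    rw [hc]
    have hf : (fun x : Nat => (a :: r)[((1 : Int) + 2 * ↑x).toNat]?) = fun k : Nat => (a :: r)[1 + 2 * k]? := by
      funext k
      have h2 : ((1 : Int) + 2 * (k : Int)).toNat = 1 + 2 * k := by omega
      rw [h2]
    rw [hf]

-- sequence[0::2] as a filterMap over indices 0, 2, 4, …
lemma slice?_evens (seq : List String) :
    (PySem.List.slice? seq none none 2).getD [] =
      List.filterMap (fun k => seq[2 * k]?) (List.range ((seq.length + 1) / 2)) := by
  cases seq with
  | nil => rfl
  | cons a r =>
    simp only [PySem.List.slice?, PySem.List.sliceIndices]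
    norm_num
    have hc : (((r.length : Int) + 1 + 2 - 1) / 2).toNat = (r.length + 1 + 1) / 2 := by omega
    rw [hc]
    have hf : (fun x : Nat => (a :: r)[((2 : Int) * ↑x).toNat]?) = fun k : Nat => (a :: r)[2 * k]? := by
      funext k
      have h2 : ((2 : Int) * (k : Int)).toNat = 2 * k := by omega
      rw [h2]
    rw [hf]

-- the odd positions are the second components of the pairs
lemma oddsAux (seq : List String) :
    List.filterMap (fun k => seq[1 + 2 * k]?) (List.range (seq.length / 2)) =
      (pvPairs seq).map Prod.snd := by
  induction seq using pvPairs.induct with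
  | case1 x y rest ih =>
    have hl : (x :: y :: rest).length / 2 = rest.length / 2 + 1 := by
      simp [List.length_cons]; omega
    rw [hl, List.range_succ_eq_map]
    simp only [List.filterMap_cons, List.filterMap_map]
    have hf : ((fun k : Nat => (x :: y :: rest)[1 + 2 * k]?) ∘ Nat.succ)
        = fun k : Nat => rest[1 + 2 * k]? := by
      funext k
      have h1 : 1 + 2 * Nat.succ k = (1 + 2 * k) + 1 + 1 := by omega
      simp [Function.comp, h1]
    rw [hf, ih]
    simp [pvPairs]
  | case2 s h1 =>
    match s, h1 with
    | [], _ => rfl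
    | [x], _ => simp [pvPairs]
    | a :: b :: r, h => exact (h a b r rfl).elim

-- the even positions are the first components of the pairs (even length)
lemma evensAux (seq : List String) (h : seq.length % 2 = 0) :
    List.filterMap (fun k => seq[2 * k]?) (List.range ((seq.length + 1) / 2)) =
      (pvPairs seq).map Prod.fst := by
  induction seq using pvPairs.induct with
  | case1 x y rest ih =>
    have hr : rest.length % 2 = 0 := by simp [List.length_cons] at h; omega
    have hl : ((x :: y :: rest).length + 1) / 2 = (rest.length + 1) / 2 + 1 := by
      simp [List.length_cons]; omega
    rw [hl, List.range_succ_eq_map]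
    simp only [List.filterMap_cons, List.filterMap_map]
    have hf : ((fun k : Nat => (x :: y :: rest)[2 * k]?) ∘ Nat.succ)
        = fun k : Nat => rest[2 * k]? := by
      funext k
      have h1 : 2 * Nat.succ k = (2 * k) + 1 + 1 := by omega
      simp [Function.comp, h1]
    rw [hf, ih hr]
    simp [pvPairs]
  | case2 s h1 =>
    match s, h1 with
    | [], _ => rfl
    | [x], _ => simp at h
    | a :: b :: r, hh => exact (hh a b r rfl).elim

-- A's indexed loop over range(0, len, 2) is a fold over the pairs (even length)
lemma foldNat {β : Type} (seq : List String) (g : β → String → String → β) :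
    ∀ (acc : β), seq.length % 2 = 0 →
      (List.range (seq.length / 2)).foldl
        (fun a k => g a (seq.getD (2 * k) "") (seq.getD (2 * k + 1) "")) acc
      = (pvPairs seq).foldl (fun a p => g a p.1 p.2) acc := by
  induction seq using pvPairs.induct with
  | case1 x y rest ih =>
    intro acc h
    have hl : (x :: y :: rest).length / 2 = rest.length / 2 + 1 := by
      simp [List.length_cons]; omega
    rw [hl, List.range_succ_eq_map]
    simp only [List.foldl_cons, List.foldl_map]
    have hb : (fun (a : β) (k : Nat) => g a ((x :: y :: rest).getD (2 * Nat.succ k) "") ((x :: y :: rest).getD (2 * Nat.succ k + 1) ""))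
        = fun a k => g a (rest.getD (2 * k) "") (rest.getD (2 * k + 1) "") := by
      funext a k
      have h1 : 2 * Nat.succ k = (2 * k) + 1 + 1 := by omega
      rw [h1]
      simp
    rw [hb]
    have hr : rest.length % 2 = 0 := by simp [List.length_cons] at h; omega
    rw [ih _ hr]
    simp [pvPairs, List.getD]
  | case2 s h1 =>
    intro acc h
    match s, h1 with
    | [], _ => rfl
    | [x], _ => simp at h
    | a :: b :: r, hh => exact (hh a b r rfl).elim

lemma foldA {β : Type} (seq : List String) (h : seq.length % 2 = 0) (g : β → String → String → β) (acc : β) :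
    (PySem.List.pyRange 0 seq.length 2).foldl
      (fun a i => g a (PySem.List.pyGetD seq i "") (PySem.List.pyGetD seq (i + 1) "")) acc
    = (pvPairs seq).foldl (fun a p => g a p.1 p.2) acc := by
  rw [PySem.List.pyRange_of_pos 0 seq.length (by norm_num)]
  have hc : (if (0 : Int) < seq.length then (((seq.length : Int) - 0 + 2 - 1) / 2).toNat else 0) = seq.length / 2 := by
    split <;> omega
  rw [hc, List.foldl_map]
  have hb : (fun (a : β) (k : Nat) => g a (PySem.List.pyGetD seq (0 + 2 * (k : Int)) "") (PySem.List.pyGetD seq (0 + 2 * (k : Int) + 1) ""))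
      = fun a k => g a (seq.getD (2 * k) "") (seq.getD (2 * k + 1) "") := by
    funext a k
    have e1 : (0 : Int) + 2 * (k : Int) = ((2 * k : Nat) : Int) := by push_cast; ring
    have e2 : (0 : Int) + 2 * (k : Int) + 1 = ((2 * k + 1 : Nat) : Int) := by push_cast; ring
    rw [e2, e1, PySem.List.pyGetD_natCast, PySem.List.pyGetD_natCast]
  rw [hb]
  exact foldNat seq g acc h

-- membership in A's duplicates set is 'count > 1'
lemma dups_contains (S : List String) (b : String) :
    PySem.Set.contains (PySem.Set.ofList (S.filter (fun s => decide (S.count s > 1)))) b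
      = decide (S.count b > 1) := by
  by_cases h : S.count b > 1
  · have hm : b ∈ S := by rw [← List.count_pos_iff]; omega
    have hmem : b ∈ PySem.Set.ofList (S.filter (fun s => decide (S.count s > 1))) := by
      rw [PySem.Set.mem_ofList]
      exact List.mem_filter.mpr ⟨hm, by simpa using h⟩
    rw [(PySem.Set.contains_iff _ b).mpr hmem]
    simp [h]
  · have hnm : b ∉ PySem.Set.ofList (S.filter (fun s => decide (S.count s > 1))) := by
      rw [PySem.Set.mem_ofList]
      intro hmem
      exact h (by simpa using (List.mem_filter.mp hmem).2)
    have hc : PySem.Set.contains (PySem.Set.ofList (S.filter (fun s => decide (S.count s > 1)))) b ≠ true := by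
      intro hc; exact hnm ((PySem.Set.contains_iff _ b).mp hc)
    rw [Bool.eq_false_iff.mpr hc]
    simp [h]

-- structural form of the adjacent scan: indices 0..len-2 versus zip L L.tail
lemma adjStruct (L : List String) :
    (List.range (L.length - 1)).filterMap (fun j =>
        if L.getD (j + 1) "" = L.getD j "" then some (L.getD (j + 1) "") else none)
      = (L.zip L.tail).filterMap (fun p => if p.2 = p.1 then some p.2 else none) := by
  induction L with
  | nil => rfl
  | cons a t ih =>
    cases t with
    | nil => rfl
    | cons b t' =>
      have hl : (a :: b :: t').length - 1 = ((b :: t').length - 1) + 1 := by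
        simp [List.length_cons]
      rw [hl, List.range_succ_eq_map]
      simp only [List.filterMap_cons, List.filterMap_map]
      have hf2 : ((fun j : Nat => if (a :: b :: t').getD (j + 1) "" = (a :: b :: t').getD j "" then some ((a :: b :: t').getD (j + 1) "") else none) ∘ Nat.succ)
          = fun j : Nat => if (b :: t').getD (j + 1) "" = (b :: t').getD j "" then some ((b :: t').getD (j + 1) "") else none := by
        funext j
        simp [Function.comp, List.getD]
      rw [hf2, ih]
      by_cases hba : b = a <;>
        simp [List.zip_cons_cons, List.getD, hba]

-- B's index comprehension over range(1, len) is a filterMap over the adjacent pairs zip L L.tail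
lemma adjIdx (L : List String) :
    (PySem.List.pyRange 1 L.length 1).filterMap (fun k =>
        if PySem.List.pyGetD L k "" = PySem.List.pyGetD L (k - 1) ""
        then some (PySem.List.pyGetD L k "") else none)
      = (L.zip L.tail).filterMap (fun p => if p.2 = p.1 then some p.2 else none) := by
  rw [PySem.List.pyRange_one, List.filterMap_map]
  have hf : ((fun k : Int =>
      if PySem.List.pyGetD L k "" = PySem.List.pyGetD L (k - 1) ""
      then some (PySem.List.pyGetD L k "") else none) ∘ fun j : Nat => (1 : Int) + j)
      = fun j : Nat => if L.getD (j + 1) "" = L.getD j "" then some (L.getD (j + 1) "") else none := by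
    funext j
    have e1 : (1 : Int) + (j : Int) = ((j + 1 : Nat) : Int) := by push_cast; ring
    have e2 : ((j + 1 : Nat) : Int) - 1 = ((j : Nat) : Int) := by push_cast; ring
    simp only [Function.comp, e1, e2, PySem.List.pyGetD_natCast]
  rw [hf]
  have hn : ((L.length : Int) - 1).toNat = L.length - 1 := by omega
  rw [hn, adjStruct]

-- in a sorted list, a value appears in the adjacent-duplicates scan iff its count exceeds 1
lemma adj_sorted_mem (L : List String) (hs : L.Pairwise (· ≤ ·)) (b : String) :
    b ∈ (L.zip L.tail).filterMap (fun p => if p.2 = p.1 then some p.2 else none)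
      ↔ 1 < L.count b := by
  induction L with
  | nil => simp
  | cons a t ih =>
    cases t with
    | nil =>
      simp only [List.tail_cons, List.zip_nil_right, List.filterMap_nil, List.not_mem_nil, false_iff, not_lt]
      have := List.count_le_length (a := b) (l := [a])
      simpa using this
    | cons c t' =>
      have hs' : (c :: t').Pairwise (· ≤ ·) := (List.pairwise_cons.mp hs).2
      have hac : a ≤ c := (List.pairwise_cons.mp hs).1 c (by simp)
      have hfor : ∀ y ∈ t', c ≤ y := fun y hy => (List.pairwise_cons.mp hs').1 y hy
      have ih' := ih hs'
      simp only [List.tail_cons] at ih' ⊢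
      simp only [List.zip_cons_cons, List.filterMap_cons]
      constructor
      · intro hmem
        by_cases hca : c = a
        · rw [if_pos hca] at hmem
          rcases List.mem_cons.mp hmem with h1 | h1
          · subst h1; subst hca
            rw [List.count_cons_self, List.count_cons_self]
            omega
          · have h2 := ih'.mp h1
            rw [List.count_cons]
            omega
        · rw [if_neg hca] at hmem
          have h2 := ih'.mp hmem
          rw [List.count_cons]
          omega
      · intro hcnt
        by_cases hba : b = a
        · subst hba
          rw [List.count_cons_self] at hcnt
          have hbt : b ∈ c :: t' := by
            rw [← List.count_pos_iff]
            omega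
          have hcb : c = b := by
            rcases List.mem_cons.mp hbt with h1 | h1
            · exact h1.symm
            · exact le_antisymm (hfor b h1) hac
          rw [hcb, if_pos rfl]
          exact List.mem_cons_self
        · have hcnt' : 1 < (c :: t').count b := by
            have hab : ¬ a = b := fun h => hba h.symm
            simpa [List.count_cons, hab] using hcnt
          have hmem := ih'.mpr hcnt'
          split
          · exact hmem
          · exact List.mem_cons_of_mem _ hmem

-- membership in B's duplicates set is 'count in bases > 1'
lemma dupsB_contains (bases : List String) (b : String) :
    PySem.Set.contains (PySem.Set.ofList
        ((PySem.List.pyRange 1 (PySem.List.sorted bases (fun x => x) false).length 1).filterMap (fun k =>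
          if PySem.List.pyGetD (PySem.List.sorted bases (fun x => x) false) k ""
              = PySem.List.pyGetD (PySem.List.sorted bases (fun x => x) false) (k - 1) ""
          then some (PySem.List.pyGetD (PySem.List.sorted bases (fun x => x) false) k "") else none))) b
      = decide (bases.count b > 1) := by
  set L := PySem.List.sorted bases (fun x => x) false with hL
  have hperm : L.Perm bases := PySem.List.sorted_perm bases (fun x => x) false
  have hpw : L.Pairwise (· ≤ ·) := by
    have := PySem.List.sorted_pairwise bases (fun x => x)
    simpa [hL] using this
  have hcount : L.count b = bases.count b := hperm.count_eq b
  have hmem : b ∈ (L.zip L.tail).filterMap (fun p => if p.2 = p.1 then some p.2 else none)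
      ↔ 1 < bases.count b := by
    rw [adj_sorted_mem L hpw b, hcount]
  rw [adjIdx L]
  by_cases h : 1 < bases.count b
  · rw [(PySem.Set.contains_iff _ b).mpr (by rw [PySem.Set.mem_ofList]; exact hmem.mpr h)]
    simp [h]
  · have hnm : b ∉ PySem.Set.ofList ((L.zip L.tail).filterMap (fun p => if p.2 = p.1 then some p.2 else none)) := by
      rw [PySem.Set.mem_ofList]
      intro hm; exact h (hmem.mp hm)
    have hc : PySem.Set.contains _ b ≠ true := fun hc => hnm ((PySem.Set.contains_iff _ b).mp hc)
    rw [Bool.eq_false_iff.mpr hc]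
    simp [h]

-- ===== VERDICT (by name: the statement is the Claim_ definition above) =====
-- skip-or-append accumulator loop as a flatMap (A's loop shape)
lemma fold_if_skip {α β : Type} (l : List α) (c : α → Bool) (f : α → List β) (acc : List β) :
    l.foldl (fun a x => if c x then a else a ++ f x) acc
      = acc ++ l.flatMap (fun x => if c x then [] else f x) := by
  rw [PySem.List.foldl_congr_mem l _ (fun (a : List β) x => a ++ (if c x then [] else f x)) acc
      (by intro acc x hx; by_cases h : c x <;> simp [h])]
  exact PySem.List.foldl_append_eq_flatMap _ _ _

theorem filter_readout_sequence_spec : Claim_equal_filter_readout_sequence := by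
  intro seq _ hpre
  unfold Pre_filter_readout_sequence at hpre
  unfold Spec_filter_readout_sequence
  simp only [filter_readout_sequence, filter_readout_sequence_alt]
  have hodds : (PySem.List.slice? seq (some 1) none 2).getD [] = (pvPairs seq).map Prod.snd := by
    rw [slice?_odds, oddsAux]
  have hevens : (PySem.List.slice? seq none none 2).getD [] = (pvPairs seq).map Prod.fst := by
    rw [slice?_evens, evensAux seq hpre]
  rw [hodds, hevens]
  set S := ((pvPairs seq).map Prod.snd).map pvBaseS with hS
  -- B's zip of the three lists is a map over the pairs
  have hzip : (((pvPairs seq).map Prod.fst).zip ((pvPairs seq).map Prod.snd)).zip S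
      = (pvPairs seq).map (fun p => ((p.1, p.2), pvBaseS p.2)) := by
    rw [hS, List.map_map, List.zip_map', List.zip_map']
    simp [Function.comp]
  rw [hzip, List.flatMap_map]
  -- A's fold over range as a fold over the pairs, then as a flatMap
  rw [foldA seq hpre (fun a s1 s2 =>
    if PySem.Set.contains (PySem.Set.ofList (S.filter (fun s => decide (S.count s > 1)))) (pvBaseS s2)
        && PySem.Str.endswith s2 "_Q" then a
    else a ++ [s1, s2]) []]
  rw [fold_if_skip, List.nil_append]
  -- the two per-pair functions are equal
  congr 1
  funext p
  rw [dups_contains S (pvBaseS p.2), dupsB_contains S (pvBaseS p.2)]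
  cases hq : PySem.Str.endswith p.2 "_Q" <;>
    by_cases hcnt : 1 < S.count (pvBaseS p.2) <;>
      simp [hcnt]
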